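-- pv_equiv track=rewrite | github.com/alanloko/Python-guia-8 | parcialSegundoCuatri.py | acomodar
-- ===== SOURCE A (Python) =====
-- def acomodar(s : list[str]) -> list[str]:
--     aux : list[str] = s.copy()
--     res : list [str] = []
--     for i in aux:
--         if(i == "UP"):
--             res.append(i)
--     for i in aux:
--         if(i == "LLA"):
--             res.append(i)
--     return res
-- ===== SOURCE B (Python) =====
-- def acomodar(s: list[str]) -> list[str]:
--     # One pass, stable two-way partition: keep a boundary index k separating
--     # the "UP" block from the "LLA" block; insert "UP"s at the boundary,
--     # append "LLA"s at the end.
--     res: list[str] = []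
--     k = 0
--     for i in s:
--         if i == "UP":
--             res.insert(k, i)
--             k += 1
--         elif i == "LLA":
--             res.append(i)
--     return res
-- ===== Notes on version B (the rewrite author's own statement) =====
-- stated objective: alternative
-- what changed: B makes a single traversal performing a stable two-way partition with an insertion-pointer (insert 'UP' at a maintained boundary index, append 'LLA' at the end), instead of A's two staged filtering passes over the list.
import Mathlib
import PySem

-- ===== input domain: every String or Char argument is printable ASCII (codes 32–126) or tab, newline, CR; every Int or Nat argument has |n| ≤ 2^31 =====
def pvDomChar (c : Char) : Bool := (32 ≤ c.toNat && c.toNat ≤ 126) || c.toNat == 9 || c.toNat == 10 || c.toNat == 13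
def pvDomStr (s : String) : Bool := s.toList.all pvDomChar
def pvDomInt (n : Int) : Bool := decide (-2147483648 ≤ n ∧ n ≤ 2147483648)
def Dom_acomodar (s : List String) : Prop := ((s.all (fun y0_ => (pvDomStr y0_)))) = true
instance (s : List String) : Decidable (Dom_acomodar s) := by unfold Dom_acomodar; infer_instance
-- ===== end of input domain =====

-- B replaces A's two staged filtering passes by ONE pass doing a stable two-way
-- partition with an insertion-pointer (objective: alternative).

-- ===== PORT A =====
def acomodar (s : List String) : List String :=
  let aux := s
  let res := aux.foldl (fun res i => if i == "UP" then res ++ [i] else res) []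
  aux.foldl (fun res i => if i == "LLA" then res ++ [i] else res) res

-- ===== PORT B =====
def acomodar_alt (s : List String) : List String :=
  (s.foldl (fun (st : List String × Int) i =>
      if i == "UP" then (PySem.List.insert st.1 st.2 i, st.2 + 1)
      else if i == "LLA" then (st.1 ++ [i], st.2)
      else st) ([], 0)).1

-- ===== PRECONDITION & SPEC =====
def Spec_acomodar (s : List String) (out : List String) : Prop := out = acomodar_alt s
instance (s : List String) (out : List String) : Decidable (Spec_acomodar s out) := by unfold Spec_acomodar; infer_instance

-- ===== CLAIM (what is proved, stated in full; the proofs are below) =====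
def Claim_equal_acomodar : Prop := ∀ (s : List String), Dom_acomodar s → Spec_acomodar s (acomodar s)

-- ===== LEMMAS AND PROOFS =====

theorem foldl_filter_eq_replicate (v : String) (s : List String) (acc : List String) :
    s.foldl (fun res i => if i == v then res ++ [i] else res) acc
      = acc ++ List.replicate (s.count v) v := by
  induction s generalizing acc with
  | nil => simp
  | cons x xs ih =>
    rw [List.foldl_cons]
    by_cases h : x = v
    · subst h
      rw [if_pos (by simp), ih]
      simp [List.replicate_succ, List.append_assoc]
    · rw [if_neg (by simpa using h), ih]
      simp [h]

theorem alt_loop (s : List String) (k m : Nat) :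
    s.foldl (fun (st : List String × Int) i =>
        if i == "UP" then (PySem.List.insert st.1 st.2 i, st.2 + 1)
        else if i == "LLA" then (st.1 ++ [i], st.2)
        else st)
      (List.replicate k "UP" ++ List.replicate m "LLA", (k : Int))
      = (List.replicate (k + s.count "UP") "UP" ++ List.replicate (m + s.count "LLA") "LLA",
         ((k + s.count "UP" : Nat) : Int)) := by
  induction s generalizing k m with
  | nil => simp
  | cons x xs ih =>
    rw [List.foldl_cons]
    by_cases hu : x = "UP"
    · subst hu
      rw [if_pos (by simp)]
      have hins : PySem.List.insert (List.replicate k "UP" ++ List.replicate m "LLA")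
          ((k : Int)) "UP" = List.replicate (k+1) "UP" ++ List.replicate m "LLA" := by
        rw [PySem.List.insert_natCast _ k _ (by simp)]
        simp [List.replicate_succ' (n := k)]
      have hk1 : ((k : Int)) + 1 = ((k + 1 : Nat) : Int) := by push_cast; ring
      rw [hins, hk1, ih (k+1) m]
      simp
      omega
    · rw [if_neg (by simpa using hu)]
      by_cases hl : x = "LLA"
      · subst hl
        rw [if_pos (by simp)]
        have : (List.replicate k "UP" ++ List.replicate m "LLA") ++ ["LLA"]
            = List.replicate k "UP" ++ List.replicate (m+1) "LLA" := by
          simp [List.replicate_succ' (n := m), List.append_assoc]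
        rw [this, ih k (m+1)]
        simp [hu]
        omega
      · rw [if_neg (by simpa using hl), ih k m]
        simp [hu, hl]

-- ===== VERDICT (by name: the statement is the Claim_ definition above) =====
theorem acomodar_spec : Claim_equal_acomodar := by
  intro s _
  show acomodar s = acomodar_alt s
  unfold acomodar acomodar_alt
  have h := alt_loop s 0 0
  simp only [List.replicate_zero, List.append_nil, Nat.cast_zero,
    Nat.zero_add] at h ⊢
  rw [h]
  rw [foldl_filter_eq_replicate, foldl_filter_eq_replicate, List.nil_append]
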